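-- pv_equiv track=rewrite | github.com/TianMingXTU/PytoWeb | pytoweb/vdom.py | _diff_props
-- ===== SOURCE A (Python) =====
-- from typing import Dict, List, Optional, Any
--
-- def _diff_props(old_props: Dict, new_props: Dict) -> Optional[Dict]:
--     """Compare props and return differences."""
--     props_patch = {}
--
--     # Check for changed or new props
--     for key, value in new_props.items():
--         if key not in old_props or old_props[key] != value:
--             props_patch[key] = value
--
--     # Check for removed props
--     for key in old_props:
--         if key not in new_props:
--             props_patch[key] = None
--
--     return props_patch if props_patch else None
-- ===== SOURCE B (Python) =====
-- def _diff_props(old_props, new_props):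
--     """Compare props and return differences (via item-set symmetric difference)."""
--     diff_items = set(new_props.items()) ^ set(old_props.items())
--     diff_keys = {k for k, _ in diff_items}
--     new_keys = set(new_props)
--     patch = {k: v for k, v in new_props.items() if k in diff_keys}
--     patch.update({k: None for k in old_props if k not in new_keys})
--     return patch or None
-- ===== Notes on version B (the rewrite author's own statement) =====
-- stated objective: alternative
-- what changed: Instead of looking each new key up in old_props one by one, B takes the symmetric difference of the two item sets to obtain the set of keys whose binding changed, then builds the patch with two filtered comprehensions; Pre_ only excludes duplicate-key association lists, which do not represent any Python dict input.
import Mathlib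
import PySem

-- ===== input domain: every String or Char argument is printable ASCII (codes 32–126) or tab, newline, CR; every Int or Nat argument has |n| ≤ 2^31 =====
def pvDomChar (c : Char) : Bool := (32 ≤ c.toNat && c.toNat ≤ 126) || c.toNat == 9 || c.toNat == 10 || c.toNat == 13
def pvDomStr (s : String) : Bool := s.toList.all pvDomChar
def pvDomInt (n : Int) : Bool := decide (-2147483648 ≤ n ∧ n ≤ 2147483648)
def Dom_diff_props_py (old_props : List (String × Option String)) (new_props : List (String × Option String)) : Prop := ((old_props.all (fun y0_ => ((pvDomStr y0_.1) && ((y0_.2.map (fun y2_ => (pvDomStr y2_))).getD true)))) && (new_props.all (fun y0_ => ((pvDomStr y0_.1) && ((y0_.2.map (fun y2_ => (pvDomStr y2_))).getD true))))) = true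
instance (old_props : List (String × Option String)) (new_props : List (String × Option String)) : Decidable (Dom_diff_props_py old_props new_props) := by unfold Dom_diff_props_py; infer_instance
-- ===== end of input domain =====

-- B replaces A's per-key lookups by a symmetric difference of the two item sets; an "alternative" rewrite, not claimed faster.

-- ===== PORT A =====
def diff_props_py (old_props : List (String × Option String)) (new_props : List (String × Option String)) : Option (List (String × Option String)) :=
  let oldD := PySem.Dict.mk old_props
  let newD := PySem.Dict.mk new_props
  -- for key, value in new_props.items(): if key not in old_props or old_props[key] != value
  -- (the short-circuit disjunction is the match: missing key → true, otherwise compare the value)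
  let patch1 := newD.items.foldl (fun acc kv =>
    if (match oldD.get? kv.1 with | none => true | some w => w != kv.2) then acc ++ [kv] else acc) []
  -- for key in old_props: if key not in new_props: props_patch[key] = None
  let patch2 := oldD.keys.foldl (fun acc k =>
    if !(newD.contains k) then acc ++ [(k, (none : Option String))] else acc) patch1
  if patch2.isEmpty then none else some patch2

-- ===== PORT B =====
def diff_props_py_alt (old_props : List (String × Option String)) (new_props : List (String × Option String)) : Option (List (String × Option String)) :=
  let oldD := PySem.Dict.mk old_props
  let newD := PySem.Dict.mk new_props
  -- diff_items = set(new_props.items()) ^ set(old_props.items())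
  let diffItems := PySem.Set.symmDiff (PySem.Set.ofList newD.items) (PySem.Set.ofList oldD.items)
  -- diff_keys = {k for k, _ in diff_items}
  let diffKeys : PySem.Set String := PySem.Set.ofList (diffItems.map Prod.fst)
  -- new_keys = set(new_props)
  let newKeys : PySem.Set String := PySem.Set.ofList newD.keys
  -- patch = {k: v for k, v in new_props.items() if k in diff_keys}
  let patch := PySem.Dict.ofList (newD.items.filter (fun kv => diffKeys.contains kv.1))
  -- patch.update({k: None for k in old_props if k not in new_keys})
  let patch2 := patch.update ((oldD.keys.filter (fun k => !(newKeys.contains k))).map (fun k => (k, (none : Option String))))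
  if patch2.items.isEmpty then none else some patch2.items

-- ===== PRECONDITION & SPEC =====
-- Pre_ excludes association lists with duplicate keys: they do not represent any Python dict
-- (the callers pass dicts, whose keys are unique; duplicates collapse before A ever sees them).
def Pre_diff_props_py (old_props : List (String × Option String)) (new_props : List (String × Option String)) : Prop :=
  (old_props.map Prod.fst).Nodup ∧ (new_props.map Prod.fst).Nodup
instance (old_props : List (String × Option String)) (new_props : List (String × Option String)) : Decidable (Pre_diff_props_py old_props new_props) := by unfold Pre_diff_props_py; infer_instance

def pvWitness_diff_props_py : (List (String × Option String)) × (List (String × Option String)) :=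
  ([("a", some "1"), ("b", none)], [("a", some "2"), ("c", none)])

def Spec_diff_props_py (old_props : List (String × Option String)) (new_props : List (String × Option String)) (out : Option (List (String × Option String))) : Prop := out = diff_props_py_alt old_props new_props
instance (old_props : List (String × Option String)) (new_props : List (String × Option String)) (out : Option (List (String × Option String))) : Decidable (Spec_diff_props_py old_props new_props out) := by unfold Spec_diff_props_py; infer_instance

-- ===== CLAIM (what is proved, stated in full; the proofs are below) =====
def Claim_equal_diff_props_py : Prop := ∀ (old_props : List (String × Option String)) (new_props : List (String × Option String)), Dom_diff_props_py old_props new_props → Pre_diff_props_py old_props new_props → Spec_diff_props_py old_props new_props (diff_props_py old_props new_props)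

-- ===== LEMMAS AND PROOFS =====

-- in a list with unique keys, two entries with the same key are the same entry
theorem pv_key_unique (l : List (String × Option String)) (h : (l.map Prod.fst).Nodup)
    {p q : String × Option String} (hp : p ∈ l) (hq : q ∈ l) (hk : p.1 = q.1) : p = q := by
  have hkeys : (PySem.Dict.mk l).keys.Nodup := h
  have h1 : (PySem.Dict.mk l).get? p.1 = some p.2 :=
    (PySem.Dict.get?_eq_some_iff_mem_items (PySem.Dict.mk l) p.1 p.2 hkeys).mpr hp
  have h2 : (PySem.Dict.mk l).get? q.1 = some q.2 :=
    (PySem.Dict.get?_eq_some_iff_mem_items (PySem.Dict.mk l) q.1 q.2 hkeys).mpr hq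
  rw [hk, h2] at h1
  exact Prod.ext hk (Option.some.inj h1.symm)

theorem pv_mem_of_get? (l : List (String × Option String)) {k : String} {v : Option String}
    (h : (PySem.Dict.mk l).get? k = some v) : (k, v) ∈ l :=
  PySem.Dict.mem_items_of_get?_eq_some (d := PySem.Dict.mk l) h

-- A's per-entry condition coincides with membership of the key in B's diff-key set
theorem pv_cond_eq (old_props new_props : List (String × Option String))
    (hold : (old_props.map Prod.fst).Nodup) (hnew : (new_props.map Prod.fst).Nodup)
    (kv : String × Option String) (hkv : kv ∈ new_props) :
    (match (PySem.Dict.mk old_props).get? kv.1 with | none => true | some w => w != kv.2)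
      = (PySem.Set.ofList
          ((PySem.Set.symmDiff (PySem.Set.ofList new_props) (PySem.Set.ofList old_props)).map Prod.fst)).contains kv.1 := by
  have holdK : (PySem.Dict.mk old_props).keys.Nodup := hold
  have hL : (match (PySem.Dict.mk old_props).get? kv.1 with | none => true | some w => w != kv.2) = true
      ↔ (PySem.Dict.mk old_props).get? kv.1 ≠ some kv.2 := by
    cases h : (PySem.Dict.mk old_props).get? kv.1 <;> simp [bne_iff_ne]
  have hR : (PySem.Set.ofList
        ((PySem.Set.symmDiff (PySem.Set.ofList new_props) (PySem.Set.ofList old_props)).map Prod.fst)).contains kv.1 = true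
      ↔ ∃ p, (p ∈ PySem.Set.symmDiff (PySem.Set.ofList new_props) (PySem.Set.ofList old_props)) ∧ p.1 = kv.1 := by
    rw [PySem.Set.contains_iff, PySem.Set.mem_ofList, List.mem_map]
  rw [Bool.eq_iff_iff, hL, hR]
  constructor
  · intro hne
    refine ⟨kv, ?_, rfl⟩
    rw [PySem.Set.mem_symmDiff, PySem.Set.mem_ofList, PySem.Set.mem_ofList]
    left
    refine ⟨hkv, fun hmem => hne ?_⟩
    exact (PySem.Dict.get?_eq_some_iff_mem_items (PySem.Dict.mk old_props) kv.1 kv.2 holdK).mpr hmem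
  · rintro ⟨p, hp, hpk⟩ hc
    rw [PySem.Set.mem_symmDiff, PySem.Set.mem_ofList, PySem.Set.mem_ofList] at hp
    have hkvold : kv ∈ old_props := pv_mem_of_get? old_props hc
    rcases hp with ⟨hpn, hpo⟩ | ⟨hpo, hpn⟩
    · have : p = kv := pv_key_unique new_props hnew hpn hkv hpk
      exact hpo (this ▸ hkvold)
    · have : p = kv := pv_key_unique old_props hold hpo hkvold hpk
      exact hpn (this ▸ hkv)

theorem pv_update_eq_foldl (d : PySem.Dict String (Option String)) (ps : List (String × Option String)) :
    d.update ps = ps.foldl (fun d p => d.insert p.1 p.2) d := by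
  unfold PySem.Dict.update; rfl

-- ===== VERDICT (by name: the statement is the Claim_ definition above) =====
theorem diff_props_py_spec : Claim_equal_diff_props_py := by
  unfold Claim_equal_diff_props_py
  intro old_props new_props _ hpre
  obtain ⟨hold, hnew⟩ := hpre
  unfold Spec_diff_props_py diff_props_py diff_props_py_alt
  dsimp only
  have hA1 : List.foldl
      (fun acc kv =>
        if (match (PySem.Dict.mk old_props).get? kv.1 with
            | none => true
            | some w => w != kv.2) = true then acc ++ [kv] else acc) [] new_props
      = new_props.filter (fun kv =>
          match (PySem.Dict.mk old_props).get? kv.1 with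
          | none => true
          | some w => w != kv.2) := by
    simpa using PySem.List.foldl_append_if
      (fun kv : String × Option String =>
        match (PySem.Dict.mk old_props).get? kv.1 with
        | none => true
        | some w => w != kv.2) id new_props []
  have hA2 := PySem.List.foldl_append_if
      (fun k : String => !(PySem.Dict.mk new_props).contains k)
      (fun k => (k, (none : Option String))) (PySem.Dict.mk old_props).keys
  -- the two element-wise conditions agree
  have hcond : List.filter
      (fun kv =>
        match (PySem.Dict.mk old_props).get? kv.1 with
        | none => true
        | some w => w != kv.2) new_props
      = List.filter (fun kv =>
          (PySem.Set.ofList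
            (List.map Prod.fst
              ((PySem.Set.ofList new_props).symmDiff (PySem.Set.ofList old_props)))).contains kv.1) new_props :=
    List.filter_congr (fun kv hkv => pv_cond_eq old_props new_props hold hnew kv hkv)
  have hp : List.filter (fun k => !(PySem.Dict.mk new_props).contains k) (PySem.Dict.mk old_props).keys
      = List.filter (fun k => !(PySem.Set.ofList (PySem.Dict.mk new_props).keys).contains k)
          (PySem.Dict.mk old_props).keys := by
    refine List.filter_congr (fun k _ => ?_)
    have : (PySem.Dict.mk new_props).contains k
        = (PySem.Set.ofList (PySem.Dict.mk new_props).keys).contains k := by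
      rw [Bool.eq_iff_iff, PySem.Dict.contains_iff_mem_keys, PySem.Set.contains_iff, PySem.Set.mem_ofList]
    rw [this]
  -- B's first comprehension builds exactly the filtered item list
  have hBf_nodup : (List.map Prod.fst (List.filter (fun kv =>
      (PySem.Set.ofList
        (List.map Prod.fst
          ((PySem.Set.ofList new_props).symmDiff (PySem.Set.ofList old_props)))).contains kv.1) new_props)).Nodup :=
    hnew.sublist (List.Sublist.map Prod.fst List.filter_sublist)
  have hpatch : (PySem.Dict.ofList (List.filter (fun kv =>
      (PySem.Set.ofList
        (List.map Prod.fst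
          ((PySem.Set.ofList new_props).symmDiff (PySem.Set.ofList old_props)))).contains kv.1) new_props)).items
      = List.filter (fun kv =>
          (PySem.Set.ofList
            (List.map Prod.fst
              ((PySem.Set.ofList new_props).symmDiff (PySem.Set.ofList old_props)))).contains kv.1) new_props := by
    simp only [PySem.Dict.ofList]
    rw [pv_update_eq_foldl,
      PySem.Dict.items_foldl_insert_fresh _ Prod.fst Prod.snd _ (by intro a _; simp) hBf_nodup]
    simp [show (PySem.Dict.empty : PySem.Dict String (Option String)).items = [] from rfl]
  -- keys appearing in B's first comprehension all come from new_props
  have hpatchkeys : ∀ k, k ∈ (PySem.Dict.ofList (List.filter (fun kv =>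
      (PySem.Set.ofList
        (List.map Prod.fst
          ((PySem.Set.ofList new_props).symmDiff (PySem.Set.ofList old_props)))).contains kv.1) new_props)).keys
      → k ∈ List.map Prod.fst new_props := by
    intro k hk
    simp only [PySem.Dict.ofList] at hk
    rw [pv_update_eq_foldl, PySem.Dict.keys_foldl_insert_key _ Prod.fst _ _] at hk
    rw [PySem.Set.mem_update] at hk
    rcases hk with hk | hk
    · simp [show (PySem.Dict.empty : PySem.Dict String (Option String)).keys = [] from rfl] at hk
    · exact (List.Sublist.map Prod.fst List.filter_sublist).subset hk
  have hrm_nodup : (List.map Prod.fst (List.map (fun k => (k, (none : Option String)))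
      (List.filter (fun k => !(PySem.Set.ofList (PySem.Dict.mk new_props).keys).contains k)
        (PySem.Dict.mk old_props).keys))).Nodup := by
    have h0 : ((PySem.Dict.mk old_props).keys.filter
        (fun k => !(PySem.Set.ofList (PySem.Dict.mk new_props).keys).contains k)).Nodup :=
      List.Nodup.filter _ hold
    simpa [List.map_map, Function.comp_def] using h0
  have hfresh : ∀ a ∈ List.map (fun k => (k, (none : Option String)))
      (List.filter (fun k => !(PySem.Set.ofList (PySem.Dict.mk new_props).keys).contains k)
        (PySem.Dict.mk old_props).keys),
      (PySem.Dict.ofList (List.filter (fun kv =>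
        (PySem.Set.ofList
          (List.map Prod.fst
            ((PySem.Set.ofList new_props).symmDiff (PySem.Set.ofList old_props)))).contains kv.1) new_props)).contains a.1 = false := by
    rintro a ha
    rw [List.mem_map] at ha
    obtain ⟨k, hkf, rfl⟩ := ha
    rw [List.mem_filter] at hkf
    obtain ⟨-, hknot⟩ := hkf
    cases h : (PySem.Dict.ofList (List.filter (fun kv =>
        (PySem.Set.ofList
          (List.map Prod.fst
            ((PySem.Set.ofList new_props).symmDiff (PySem.Set.ofList old_props)))).contains kv.1) new_props)).contains (k, (none : Option String)).1
    · rfl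
    · exfalso
      have hkmem : k ∈ List.map Prod.fst new_props :=
        hpatchkeys k ((PySem.Dict.contains_iff_mem_keys _ _).mp h)
      simp at hknot
      obtain ⟨p, hp, rfl⟩ := List.mem_map.mp hkmem
      exact hknot p.2 hp
  have hB2 : ((PySem.Dict.ofList (List.filter (fun kv =>
      (PySem.Set.ofList
        (List.map Prod.fst
          ((PySem.Set.ofList new_props).symmDiff (PySem.Set.ofList old_props)))).contains kv.1) new_props)).update
        (List.map (fun k => (k, (none : Option String)))
          (List.filter (fun k => !(PySem.Set.ofList (PySem.Dict.mk new_props).keys).contains k)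
            (PySem.Dict.mk old_props).keys))).items
      = List.filter (fun kv =>
          (PySem.Set.ofList
            (List.map Prod.fst
              ((PySem.Set.ofList new_props).symmDiff (PySem.Set.ofList old_props)))).contains kv.1) new_props
        ++ List.map (fun k => (k, (none : Option String)))
            (List.filter (fun k => !(PySem.Set.ofList (PySem.Dict.mk new_props).keys).contains k)
              (PySem.Dict.mk old_props).keys) := by
    rw [pv_update_eq_foldl,
      PySem.Dict.items_foldl_insert_fresh _ Prod.fst Prod.snd _ hfresh hrm_nodup, hpatch]
    simp
  rw [hA1, hA2, hcond, hp, hB2]
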